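-- pv_equiv track=rewrite | github.com/josealt2197/PP1 | Proyecto Josué y Jose/ProgramaPrincipal.py | validarEntradaNumAst
-- ===== SOURCE A (Python) =====
-- def buscarCaracter(cadena, caracter):
--     indice = 0
--
--     while (indice != len(cadena)):
--         if (cadena[indice] == caracter):
--             return indice
--         indice += 1
--
--     return -1
--
-- def validarEntradaNumAst(cadena):
--
--     entradaValida = False
--
--     abcAst = "0123456789*"
--
--     if (cadena==""):
--         return "-1"
--     else:
--         indice=0
--         while (indice != len(cadena)):
--             if(buscarCaracter(abcAst, cadena[indice])==-1):
--                 return "-2"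
--             indice+=1
--
--         entradaValida = True
--
--     if(entradaValida == True):
--         return cadena
-- ===== SOURCE B (Python) =====
-- import re
--
-- _PATRON_NUM_AST = re.compile(r'[0-9*]+')
--
-- def validarEntradaNumAst(cadena):
--     if cadena == "":
--         return "-1"
--     if _PATRON_NUM_AST.fullmatch(cadena):
--         return cadena
--     return "-2"
-- ===== Notes on version B (the rewrite author's own statement) =====
-- stated objective: idiomatic
-- what changed: Replaces the index-driven per-character while-loop plus buscarCaracter's hand-rolled linear scan of the 11-char alphabet by a single compiled-regex fullmatch of the character class [0-9*]+, keeping the empty-string guard first since + rejects the empty string.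
import Mathlib
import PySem

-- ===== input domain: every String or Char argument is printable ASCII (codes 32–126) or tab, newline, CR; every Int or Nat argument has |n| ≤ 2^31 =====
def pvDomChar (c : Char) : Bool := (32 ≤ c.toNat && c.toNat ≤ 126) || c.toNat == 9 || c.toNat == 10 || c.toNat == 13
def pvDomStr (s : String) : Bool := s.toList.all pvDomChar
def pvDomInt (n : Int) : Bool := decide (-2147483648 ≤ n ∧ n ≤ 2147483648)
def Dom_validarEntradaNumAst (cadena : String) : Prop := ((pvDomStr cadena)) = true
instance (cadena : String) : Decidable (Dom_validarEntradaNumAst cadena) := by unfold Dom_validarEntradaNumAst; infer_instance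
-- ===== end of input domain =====

-- B replaces A's per-character while-loop with its inner hand-rolled alphabet scan (buscarCaracter)
-- by a single compiled-regex fullmatch of the pattern [0-9*]+, empty-string guard kept first;
-- objective: idiomatic.

-- ===== PORT A =====
-- while-loop of buscarCaracter as structural recursion over the remaining characters, carrying the index
def buscarCaracterAux (cs : List Char) (caracter : Char) (indice : Int) : Int :=
  match cs with
  | [] => -1
  | c :: rest => if c = caracter then indice else buscarCaracterAux rest caracter (indice + 1)

def buscarCaracter (cadena : String) (caracter : Char) : Int :=
  buscarCaracterAux cadena.toList caracter 0

-- the validation while-loop: advance over the characters, return "-2" on the first failure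
def validarLoopA (cadena : String) (cs : List Char) : String :=
  match cs with
  | [] => cadena
  | c :: rest => if buscarCaracter "0123456789*" c = -1 then "-2" else validarLoopA cadena rest

def validarEntradaNumAst (cadena : String) : String :=
  if cadena = "" then "-1"
  else validarLoopA cadena cadena.toList

-- ===== PORT B =====
-- re.fullmatch(r'[0-9*]+', cadena) ported by hand as the exact semantics of this fixed pattern:
-- the character class [0-9*] is the code-point range test 48 ≤ c ≤ 57 or c = 42 ('*'), and the
-- + quantifier over a one-character class matches exactly the nonempty strings all of whose
-- characters match the class. Exact for this pattern on all inputs.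
def reClassNumAst (c : Char) : Bool := (48 ≤ c.toNat && c.toNat ≤ 57) || c.toNat == 42

def reFullmatchNumAstPlus (cadena : String) : Bool :=
  !cadena.toList.isEmpty && cadena.toList.all reClassNumAst

def validarEntradaNumAst_alt (cadena : String) : String :=
  if cadena = "" then "-1"
  else if reFullmatchNumAstPlus cadena then cadena
  else "-2"

-- ===== PRECONDITION & SPEC =====
def Spec_validarEntradaNumAst (cadena : String) (out : String) : Prop := out = validarEntradaNumAst_alt cadena
instance (cadena : String) (out : String) : Decidable (Spec_validarEntradaNumAst cadena out) := by unfold Spec_validarEntradaNumAst; infer_instance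

-- ===== CLAIM (what is proved, stated in full; the proofs are below) =====
def Claim_equal_validarEntradaNumAst : Prop := ∀ (cadena : String), Dom_validarEntradaNumAst cadena → Spec_validarEntradaNumAst cadena (validarEntradaNumAst cadena)

-- ===== LEMMAS AND PROOFS =====
lemma buscarCaracterAux_eq_neg_one_iff (cs : List Char) (c : Char) (i : Int) (hi : 0 ≤ i) :
    buscarCaracterAux cs c i = -1 ↔ c ∉ cs := by
  induction cs generalizing i with
  | nil => simp [buscarCaracterAux]
  | cons a rest ih =>
    simp only [buscarCaracterAux, List.mem_cons]
    by_cases h : a = c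
    · simp [h]; omega
    · simp [h, Ne.symm h, ih (i + 1) (by omega)]

lemma buscarCaracter_eq_neg_one_iff (s : String) (c : Char) :
    buscarCaracter s c = -1 ↔ c ∉ s.toList := by
  exact buscarCaracterAux_eq_neg_one_iff _ _ 0 le_rfl

lemma alpha_list : "0123456789*".toList = ['0','1','2','3','4','5','6','7','8','9','*'] := by decide

lemma char_toNat_inj (c d : Char) (h : c.toNat = d.toNat) : c = d := by
  apply Char.ext; exact UInt32.toNat_inj.mp h

lemma mem_alphabet_iff_class (c : Char) :
    c ∈ "0123456789*".toList ↔ reClassNumAst c = true := by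
  rw [alpha_list]
  simp only [List.mem_cons, reClassNumAst, Bool.or_eq_true,
    Bool.and_eq_true, decide_eq_true_eq, beq_iff_eq]
  constructor
  · rintro (rfl|rfl|rfl|rfl|rfl|rfl|rfl|rfl|rfl|rfl|rfl|h)
    · decide
    · decide
    · decide
    · decide
    · decide
    · decide
    · decide
    · decide
    · decide
    · decide
    · decide
    · cases h
  · rintro (⟨h1, h2⟩ | h)
    · have h40 : c.toNat = 48 ∨ c.toNat = 49 ∨ c.toNat = 50 ∨ c.toNat = 51 ∨ c.toNat = 52 ∨ c.toNat = 53 ∨ c.toNat = 54 ∨ c.toNat = 55 ∨ c.toNat = 56 ∨ c.toNat = 57 := by omega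
      have hc : c = '0' ∨ c = '1' ∨ c = '2' ∨ c = '3' ∨ c = '4' ∨ c = '5' ∨ c = '6' ∨ c = '7' ∨ c = '8' ∨ c = '9' := by
        rcases h40 with h|h|h|h|h|h|h|h|h|h
        · exact Or.inl (char_toNat_inj c '0' (by rw [h]; decide))
        · exact Or.inr (Or.inl (char_toNat_inj c '1' (by rw [h]; decide)))
        · exact Or.inr (Or.inr (Or.inl (char_toNat_inj c '2' (by rw [h]; decide))))
        · exact Or.inr (Or.inr (Or.inr (Or.inl (char_toNat_inj c '3' (by rw [h]; decide)))))
        · exact Or.inr (Or.inr (Or.inr (Or.inr (Or.inl (char_toNat_inj c '4' (by rw [h]; decide))))))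
        · exact Or.inr (Or.inr (Or.inr (Or.inr (Or.inr (Or.inl (char_toNat_inj c '5' (by rw [h]; decide)))))))
        · exact Or.inr (Or.inr (Or.inr (Or.inr (Or.inr (Or.inr (Or.inl (char_toNat_inj c '6' (by rw [h]; decide))))))))
        · exact Or.inr (Or.inr (Or.inr (Or.inr (Or.inr (Or.inr (Or.inr (Or.inl (char_toNat_inj c '7' (by rw [h]; decide)))))))))
        · exact Or.inr (Or.inr (Or.inr (Or.inr (Or.inr (Or.inr (Or.inr (Or.inr (Or.inl (char_toNat_inj c '8' (by rw [h]; decide))))))))))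
        · exact Or.inr (Or.inr (Or.inr (Or.inr (Or.inr (Or.inr (Or.inr (Or.inr (Or.inr (char_toNat_inj c '9' (by rw [h]; decide))))))))))
      rcases hc with rfl|rfl|rfl|rfl|rfl|rfl|rfl|rfl|rfl|rfl <;> decide
    · have := char_toNat_inj c '*' (by rw [h]; decide)
      subst this; decide

lemma validarLoopA_eq (cadena : String) (cs : List Char) :
    validarLoopA cadena cs = if ∀ c ∈ cs, c ∈ "0123456789*".toList then cadena else "-2" := by
  induction cs with
  | nil => simp [validarLoopA]
  | cons c rest ih =>
    by_cases h : c ∈ "0123456789*".toList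
    · have hb : ¬ buscarCaracter "0123456789*" c = -1 :=
        fun hh => ((buscarCaracter_eq_neg_one_iff _ _).mp hh) h
      rw [validarLoopA, if_neg hb, ih]
      by_cases hr : ∀ x ∈ rest, x ∈ "0123456789*".toList
      · rw [if_pos hr, if_pos ?_]
        intro x hx
        rcases List.mem_cons.mp hx with rfl | hx
        · exact h
        · exact hr x hx
      · rw [if_neg hr, if_neg ?_]
        intro hall
        exact hr fun x hx => hall x (List.mem_cons_of_mem _ hx)
    · have hb : buscarCaracter "0123456789*" c = -1 := (buscarCaracter_eq_neg_one_iff _ _).mpr h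
      rw [validarLoopA, if_pos hb, if_neg ?_]
      intro hall
      exact h (hall c (List.mem_cons_self ..))

lemma toList_ne_nil_of_ne_empty (s : String) (h : s ≠ "") : s.toList ≠ [] := by
  simpa [String.toList_eq_nil_iff] using h

lemma fullmatch_iff (cadena : String) (hne : cadena.toList ≠ []) :
    reFullmatchNumAstPlus cadena = true ↔ ∀ c ∈ cadena.toList, c ∈ "0123456789*".toList := by
  unfold reFullmatchNumAstPlus
  simp only [Bool.and_eq_true, Bool.not_eq_true', List.all_eq_true]
  constructor
  · intro h c hc
    exact (mem_alphabet_iff_class c).mpr (h.2 c hc)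
  · intro h
    exact ⟨by simp [hne], fun c hc => (mem_alphabet_iff_class c).mp (h c hc)⟩

-- ===== VERDICT (by name: the statement is the Claim_ definition above) =====
theorem validarEntradaNumAst_spec : Claim_equal_validarEntradaNumAst := by
  intro cadena _
  unfold Spec_validarEntradaNumAst validarEntradaNumAst validarEntradaNumAst_alt
  by_cases hempty : cadena = ""
  · simp [hempty]
  · have hne : cadena.toList ≠ [] := toList_ne_nil_of_ne_empty cadena hempty
    simp only [hempty, if_false, validarLoopA_eq]
    by_cases hall : ∀ c ∈ cadena.toList, c ∈ "0123456789*".toList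
    · rw [if_pos hall, if_pos ((fullmatch_iff cadena hne).mpr hall)]
    · rw [if_neg hall, if_neg (fun h => hall ((fullmatch_iff cadena hne).mp h))]
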